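-- pv_equiv track=rewrite | github.com/RustyGrassG/pygame_tetris | tetris/scripts/utils.py | flat_to_matrix
-- ===== SOURCE A (Python) =====
-- def flat_to_matrix(flat_shape):
--     matrix = []
--     row = []
--     for val in flat_shape:
--         if val == -1:
--             matrix.append(row)
--             row = []
--         else:
--             row.append(val)
--     if row:
--         matrix.append(row)
--     return matrix
-- ===== SOURCE B (Python) =====
-- def flat_to_matrix(flat_shape):
--     delims = [i for i, v in enumerate(flat_shape) if v == -1]
--     out = []
--     prev = -1
--     for p in delims:
--         out.append(flat_shape[prev + 1:p])
--         prev = p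
--     tail = flat_shape[prev + 1:]
--     if tail:
--         out.append(tail)
--     return out
-- ===== Notes on version B (the rewrite author's own statement) =====
-- stated objective: alternative
-- what changed: B first collects the indices of the -1 delimiters in one pass, then emits each row as a slice between consecutive delimiters (appending the tail slice only if non-empty), instead of A's element-by-element accumulation into a growing row.
import Mathlib
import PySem

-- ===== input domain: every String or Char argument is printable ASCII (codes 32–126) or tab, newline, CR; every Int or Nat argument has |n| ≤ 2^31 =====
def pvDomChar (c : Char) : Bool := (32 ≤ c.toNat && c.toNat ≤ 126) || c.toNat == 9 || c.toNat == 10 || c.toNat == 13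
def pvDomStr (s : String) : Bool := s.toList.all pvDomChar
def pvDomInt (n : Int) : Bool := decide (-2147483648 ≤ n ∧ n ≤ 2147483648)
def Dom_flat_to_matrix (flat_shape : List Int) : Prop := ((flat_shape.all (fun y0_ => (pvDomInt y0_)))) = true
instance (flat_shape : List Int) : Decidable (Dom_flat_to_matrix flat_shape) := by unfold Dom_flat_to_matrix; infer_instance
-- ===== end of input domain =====

-- B collects the -1 delimiter indices first and emits rows as slices between them
-- (alternative decomposition, same O(n) cost); proved equal to A on all inputs.


-- ===== PORT A =====
def flat_to_matrix (flat_shape : List Int) : List (List Int) :=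
  let st := flat_shape.foldl
    (fun (acc : List (List Int) × List Int) val =>
      if val = -1 then (acc.1 ++ [acc.2], ([] : List Int))
      else (acc.1, acc.2 ++ [val]))
    ([], [])
  if st.2.isEmpty then st.1 else st.1 ++ [st.2]

-- ===== PORT B =====
def flat_to_matrix_alt (flat_shape : List Int) : List (List Int) :=
  let delims := ((PySem.List.enumerate flat_shape).filter (fun iv => iv.2 == -1)).map (·.1)
  let st := delims.foldl
    (fun (acc : List (List Int) × Int) p =>
      (acc.1 ++ [PySem.List.slice flat_shape (some (acc.2 + 1)) (some p)], p))
    ([], -1)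
  let tail := PySem.List.slice flat_shape (some (st.2 + 1)) none
  if tail.isEmpty then st.1 else st.1 ++ [tail]

-- ===== PRECONDITION & SPEC =====
def Spec_flat_to_matrix (flat_shape : List Int) (out : List (List Int)) : Prop := out = flat_to_matrix_alt flat_shape
instance (flat_shape : List Int) (out : List (List Int)) : Decidable (Spec_flat_to_matrix flat_shape out) := by unfold Spec_flat_to_matrix; infer_instance

-- ===== CLAIM (what is proved, stated in full; the proofs are below) =====
def Claim_equal_flat_to_matrix : Prop := ∀ (flat_shape : List Int), Dom_flat_to_matrix flat_shape → Spec_flat_to_matrix flat_shape (flat_to_matrix flat_shape)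

-- ===== LEMMAS AND PROOFS =====

/-- Reference recursive characterisation both ports are proved equal to. -/
def pvR : List Int → List (List Int)
  | [] => []
  | v :: t =>
    if v = -1 then [] :: pvR t
    else match pvR t with
      | [] => [[v]]
      | r :: rs => (v :: r) :: rs

-- ---- A-side ----

theorem aFold (l : List Int) (m : List (List Int)) (r : List Int) :
    (let st := l.foldl
        (fun (acc : List (List Int) × List Int) val =>
          if val = -1 then (acc.1 ++ [acc.2], ([] : List Int))
          else (acc.1, acc.2 ++ [val]))
        (m, r)
      if st.2.isEmpty then st.1 else st.1 ++ [st.2])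
    = m ++ (match pvR l with
            | [] => if r.isEmpty then [] else [r]
            | s :: rs => (r ++ s) :: rs) := by
  induction l generalizing m r with
  | nil =>
    simp only [List.foldl_nil, pvR]
    cases r <;> simp
  | cons v t ih =>
    simp only [List.foldl_cons]
    by_cases hv : v = -1
    · simp only [hv, pvR, ih]
      cases hp : pvR t <;> simp
    · simp only [if_neg hv, pvR, ih]
      cases hp : pvR t with
      | nil => simp
      | cons s rs => simp

theorem a_eq_pvR (l : List Int) : flat_to_matrix l = pvR l := by
  have h := aFold l [] []
  simp only [flat_to_matrix]
  simp only [List.nil_append] at h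
  rw [h]
  cases hp : pvR l <;> simp

-- ---- B-side ----

/-- Delimiter indices of `l` when enumeration starts at `s`. -/
def pvDelims (s : Int) : List Int → List Int
  | [] => []
  | v :: t => if v = -1 then s :: pvDelims (s + 1) t else pvDelims (s + 1) t

theorem enum_delims (l : List Int) (s : Int) :
    ((PySem.List.enumerate l s).filter (fun iv => iv.2 == -1)).map (·.1) = pvDelims s l := by
  induction l generalizing s with
  | nil => simp [PySem.List.enumerate_nil, pvDelims]
  | cons v t ih =>
    rw [PySem.List.enumerate_cons]
    by_cases hv : v = -1 <;> simp [pvDelims, hv, ih]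

theorem delims_nonneg (l : List Int) (s : Int) (p : Int) (hp : p ∈ pvDelims s l) : s ≤ p := by
  induction l generalizing s with
  | nil => simp [pvDelims] at hp
  | cons v t ih =>
    simp only [pvDelims] at hp
    by_cases hv : v = -1
    · rw [if_pos hv] at hp
      rcases List.mem_cons.mp hp with h | h
      · omega
      · have := ih (s + 1) h; omega
    · rw [if_neg hv] at hp
      have := ih (s + 1) hp; omega

/-- Rows emitted by B's main loop and tail step, given the remaining delimiters. -/
def pvSegs (flat : List Int) (prev : Int) : List Int → List (List Int)
  | [] =>
    let tail := PySem.List.slice flat (some (prev + 1)) none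
    if tail.isEmpty then [] else [tail]
  | p :: ps => PySem.List.slice flat (some (prev + 1)) (some p) :: pvSegs flat p ps

theorem bFold (flat : List Int) (ds : List Int) (out : List (List Int)) (prev : Int) :
    (let st := ds.foldl
        (fun (acc : List (List Int) × Int) p =>
          (acc.1 ++ [PySem.List.slice flat (some (acc.2 + 1)) (some p)], p))
        (out, prev)
      let tail := PySem.List.slice flat (some (st.2 + 1)) none
      if tail.isEmpty then st.1 else st.1 ++ [tail])
    = out ++ pvSegs flat prev ds := by
  induction ds generalizing out prev with
  | nil => simp only [List.foldl_nil, pvSegs]; split <;> simp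
  | cons p ps ih => simp only [List.foldl_cons, pvSegs, ih, List.append_assoc, List.cons_append,
      List.nil_append]

theorem b_eq_segs (l : List Int) :
    flat_to_matrix_alt l = pvSegs l (-1) (pvDelims 0 l) := by
  simp only [flat_to_matrix_alt, enum_delims]
  have h := bFold l (pvDelims 0 l) [] (-1)
  simpa using h

-- slice shift lemmas
theorem slice_cons_shift (x : Int) (u : List Int) (a b : Int) (ha : 0 ≤ a) (hb : 0 ≤ b) :
    PySem.List.slice (x :: u) (some (a + 1)) (some (b + 1)) = PySem.List.slice u (some a) (some b) := by
  rw [PySem.List.slice_toNat _ (by omega) (by omega), PySem.List.slice_toNat _ ha hb]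
  have h1 : (a + 1).toNat = a.toNat + 1 := by omega
  have h2 : (b + 1).toNat = b.toNat + 1 := by omega
  simp [h1, h2]

theorem slice_cons_from (x : Int) (u : List Int) (a : Int) (ha : 0 ≤ a) :
    PySem.List.slice (x :: u) (some (a + 1)) none = PySem.List.slice u (some a) none := by
  rw [PySem.List.slice_from _ (by omega : (0:Int) ≤ a + 1), PySem.List.slice_from _ ha]
  have h1 : (a + 1).toNat = a.toNat + 1 := by omega
  simp [h1]

theorem slice_cons_head (x : Int) (u : List Int) (p : Int) (hp : 0 ≤ p) :
    PySem.List.slice (x :: u) (some (-1 + 1)) (some (p + 1))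
      = x :: PySem.List.slice u (some (-1 + 1)) (some p) := by
  rw [PySem.List.slice_toNat _ (by norm_num) (by omega), PySem.List.slice_toNat _ (by norm_num) hp]
  have h2 : (p + 1).toNat = p.toNat + 1 := by omega
  norm_num [h2]

theorem segs_shift (x : Int) (u : List Int) (ds : List Int) (prev : Int)
    (hprev : -1 ≤ prev) (hds : ∀ p ∈ ds, 0 ≤ p) :
    pvSegs (x :: u) (prev + 1) (ds.map (· + 1)) = pvSegs u prev ds := by
  induction ds generalizing prev with
  | nil =>
    simp only [List.map_nil, pvSegs]
    rw [slice_cons_from _ _ _ (by omega)]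
  | cons p ps ih =>
    simp only [List.map_cons, pvSegs]
    have hp : 0 ≤ p := hds p (List.mem_cons_self ..)
    rw [slice_cons_shift _ _ _ _ (by omega) hp,
      ih p (by omega) (fun q hq => hds q (List.mem_cons_of_mem _ hq))]

theorem delims_shift (l : List Int) (s : Int) :
    pvDelims (s + 1) l = (pvDelims s l).map (· + 1) := by
  induction l generalizing s with
  | nil => simp [pvDelims]
  | cons v t ih =>
    by_cases hv : v = -1 <;> simp [pvDelims, hv, ih (s + 1)]

theorem segs_eq_pvR (l : List Int) : pvSegs l (-1) (pvDelims 0 l) = pvR l := by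
  induction l with
  | nil =>
    simp [pvSegs, pvDelims, pvR]
  | cons v t ih =>
    have hsh := delims_shift t 0
    have hnn : ∀ p ∈ pvDelims 0 t, 0 ≤ p := fun p hp => delims_nonneg t 0 p hp
    by_cases hv : v = -1
    · simp only [pvDelims, if_pos hv, hsh, pvSegs, pvR]
      have h0 : PySem.List.slice (v :: t) (some (-1 + 1)) (some 0) = [] := by
        rw [PySem.List.slice_toNat _ (by norm_num) le_rfl]; simp
      have h1 := segs_shift v t (pvDelims 0 t) (-1) le_rfl hnn
      norm_num at h1
      rw [h0, h1, ih]
    · simp only [pvDelims, if_neg hv, hsh, pvR]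
      rw [← ih]
      cases hd : pvDelims 0 t with
      | nil =>
        simp only [List.map_nil, pvSegs]
        rw [PySem.List.slice_from (v :: t) (by norm_num : (0:Int) ≤ -1 + 1),
          PySem.List.slice_from t (by norm_num : (0:Int) ≤ -1 + 1)]
        cases t <;> simp
      | cons p ps =>
        have hp : 0 ≤ p := hnn p (hd ▸ List.mem_cons_self ..)
        have hps : ∀ q ∈ ps, 0 ≤ q := fun q hq => hnn q (hd ▸ List.mem_cons_of_mem _ hq)
        simp only [List.map_cons, pvSegs]
        have e2 := segs_shift v t ps p (by omega) hps
        rw [slice_cons_head v t p hp, e2]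

-- ===== VERDICT (by name: the statement is the Claim_ definition above) =====
theorem flat_to_matrix_spec : Claim_equal_flat_to_matrix := by
  intro l _
  unfold Spec_flat_to_matrix
  rw [a_eq_pvR, b_eq_segs, segs_eq_pvR]
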